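-- pv_equiv track=rewrite | github.com/Coamithra/MTGAI | backend/mtgai/pipeline/server.py | _terminal_status
-- ===== SOURCE A (Python) =====
-- def _terminal_status(events: list[dict]) -> str:
--     """Decide which lifecycle status to attach to a finished run.
--
--     Looks at the last few events because the constraints pass appends a
--     final ``done`` even after a partial subcall failure — we want
--     "completed" in that case but "error" / "cancelled" for the cases
--     where the worker bailed before finishing.
--
--     If we don't see a recognised terminal event at all, default to
--     "error". The worker's ``finally`` only runs after an exception or
--     an early-return path, neither of which should be reported as
--     success — the front-end's "did the run actually finish?" check
--     looks for a ``done`` event in the buffer, not a ``status`` field.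
--     """
--     for event in reversed(events):
--         etype = event.get("type")
--         if etype == "done":
--             return "completed"
--         if etype == "cancelled":
--             return "cancelled"
--         if etype == "error":
--             return "error"
--     return "error"
-- ===== SOURCE B (Python) =====
-- _TERMINAL = {"done": "completed", "cancelled": "cancelled", "error": "error"}
--
-- def _terminal_status(events: list[dict]) -> str:
--     status = "error"
--     for event in events:
--         etype = event.get("type")
--         if etype in _TERMINAL:
--             status = _TERMINAL[etype]
--     return status
-- ===== Notes on version B (the rewrite author's own statement) =====
-- stated objective: alternative
-- what changed: B replaces A's reversed scan with early returns by a single forward pass keeping an accumulator overwritten via a terminal-status mapping table.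
import Mathlib
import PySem

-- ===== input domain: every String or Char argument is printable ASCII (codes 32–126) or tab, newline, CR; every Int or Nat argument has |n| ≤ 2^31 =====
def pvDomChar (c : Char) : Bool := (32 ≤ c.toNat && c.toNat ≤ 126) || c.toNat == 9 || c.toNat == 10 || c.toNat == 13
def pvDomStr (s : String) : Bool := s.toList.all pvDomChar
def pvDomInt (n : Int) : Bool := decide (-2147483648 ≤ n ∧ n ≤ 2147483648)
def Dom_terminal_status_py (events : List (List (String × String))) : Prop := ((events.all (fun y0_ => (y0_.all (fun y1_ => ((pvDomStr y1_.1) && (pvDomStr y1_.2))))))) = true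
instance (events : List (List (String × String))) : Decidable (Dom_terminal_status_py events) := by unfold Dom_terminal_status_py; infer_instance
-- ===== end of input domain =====

-- B: forward accumulator pass with a mapping table instead of A's reversed scan with early returns (same cost, different decomposition).

-- ===== PORT A =====
-- A's reversed loop: recursion over events.reverse, early return on a terminal type.
def terminalStatusGo : List (List (String × String)) → String
  | [] => "error"
  | event :: rest =>
    let etype := (PySem.Dict.mk event).get? "type"
    if etype = some "done" then "completed"
    else if etype = some "cancelled" then "cancelled"
    else if etype = some "error" then "error"
    else terminalStatusGo rest

def terminal_status_py (events : List (List (String × String))) : String :=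
  terminalStatusGo events.reverse

-- ===== PORT B =====
def terminalMap : PySem.Dict String String :=
  PySem.Dict.mk [("done", "completed"), ("cancelled", "cancelled"), ("error", "error")]

def terminal_status_py_alt (events : List (List (String × String))) : String :=
  events.foldl (fun status event =>
    match (PySem.Dict.mk event).get? "type" with
    | some etype =>
      match terminalMap.get? etype with
      | some v => v
      | none => status
    | none => status) "error"

-- ===== PRECONDITION & SPEC =====
def Spec_terminal_status_py (events : List (List (String × String))) (out : String) : Prop := out = terminal_status_py_alt events
instance (events : List (List (String × String))) (out : String) : Decidable (Spec_terminal_status_py events out) := by unfold Spec_terminal_status_py; infer_instance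

-- ===== CLAIM (what is proved, stated in full; the proofs are below) =====
def Claim_equal_terminal_status_py : Prop := ∀ (events : List (List (String × String))), Dom_terminal_status_py events → Spec_terminal_status_py events (terminal_status_py events)

-- ===== LEMMAS AND PROOFS =====

-- B's loop body as a named function.
def bStep (status : String) (event : List (String × String)) : String :=
  match (PySem.Dict.mk event).get? "type" with
  | some etype =>
    match terminalMap.get? etype with
    | some v => v
    | none => status
  | none => status

theorem alt_eq_foldl (events : List (List (String × String))) :
    terminal_status_py_alt events = events.foldl bStep "error" := rfl

-- Appending one event on the right = reversed scan seeing it first.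
theorem go_snoc (l : List (List (String × String))) (e : List (String × String)) :
    terminalStatusGo ((l ++ [e]).reverse) = bStep (terminalStatusGo l.reverse) e := by
  rw [List.reverse_append]
  simp only [List.reverse_cons, List.reverse_nil, List.nil_append, List.singleton_append]
  rw [terminalStatusGo]
  simp only [bStep]
  rcases h : (PySem.Dict.mk e).get? "type" with _ | t
  · simp
  · by_cases hd : t = "done"
    · subst hd; simp [terminalMap, PySem.Dict.get?]
    · by_cases hc : t = "cancelled"
      · subst hc; simp [terminalMap, PySem.Dict.get?]
      · by_cases he : t = "error"
        · subst he; simp [terminalMap, PySem.Dict.get?]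
        · have h1 : ("done" == t) = false := by simp [Ne.symm hd]
          have h2 : ("cancelled" == t) = false := by simp [Ne.symm hc]
          have h3 : ("error" == t) = false := by simp [Ne.symm he]
          simp [terminalMap, PySem.Dict.get?, List.find?, h1, h2, h3, hd, hc, he]

theorem go_eq_foldl (events : List (List (String × String))) :
    terminalStatusGo events.reverse = events.foldl bStep "error" := by
  induction events using List.reverseRecOn with
  | nil => rfl
  | append_singleton l e ih =>
    rw [go_snoc, ih, List.foldl_append]
    rfl

-- ===== VERDICT (by name: the statement is the Claim_ definition above) =====
theorem terminal_status_py_spec : Claim_equal_terminal_status_py := by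
  intro events _
  unfold Spec_terminal_status_py terminal_status_py
  rw [alt_eq_foldl, go_eq_foldl]
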